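-- pv_equiv track=rewrite | github.com/DMChernowitz/Perspectiville | utils.py | scan_wall
-- ===== SOURCE A (Python) =====
-- from math import gcd
--
-- def scan_wall(wall,j,k):
--     h_ribs_front = sorted(wall, key=lambda x: (x[k], x[j]))
--     z0 = None
--     running_gcd = 0
--     l = 0
--     xmin = min([w[j] for w in wall])
--     for w in h_ribs_front:
--         if w[k] != z0:
--             running_gcd = gcd(l,running_gcd,w[j]-xmin)
--             l = 0
--             z0 = w[k]
--             x0 = w[j]
--         elif w[j] != x0:
--             running_gcd = gcd(l,running_gcd,w[j]-x0)
--             l = 0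
--             x0 = w[j]
--         if running_gcd == 1:
--             return 1
--         l += 1
--         x0 += 1
--     return gcd(l,running_gcd)
-- ===== SOURCE B (Python) =====
-- from math import gcd
--
-- def scan_wall(wall, j, k):
--     # No sorting: index the ribs by their (level, position) pair in a hash map,
--     # then gcd the run boundaries found by neighbour lookups.
--     xmin = min(w[j] for w in wall)
--     seen = {}
--     for w in wall:
--         p = (w[k], w[j])
--         if p in seen:
--             return 1  # two coincident ribs: the spacing pattern degenerates, gcd is 1
--         seen[p] = True
--     g = 0
--     for (z, x) in seen:
--         if (z, x - 1) not in seen: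
--             g = gcd(g, x - xmin)      # x starts a run of consecutive ribs
--         if (z, x + 1) not in seen:
--             g = gcd(g, x + 1 - xmin)  # one past the end of a run
--     return g
-- ===== Notes on version B (the rewrite author's own statement) =====
-- stated objective: alternative
-- what changed: A sorts the ribs by (k,j) and scans the sorted list merging consecutive runs with a running length counter; B never sorts: it indexes every (w[k],w[j]) pair in a hash map (returning 1 as soon as a duplicate pair appears, which is what the gcd of A's -1 gap yields) and then, for each rib, detects run starts and run ends by membership lookups of its two neighbours, folding the boundary offsets from the global minimum into one gcd.
import Mathlib
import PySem

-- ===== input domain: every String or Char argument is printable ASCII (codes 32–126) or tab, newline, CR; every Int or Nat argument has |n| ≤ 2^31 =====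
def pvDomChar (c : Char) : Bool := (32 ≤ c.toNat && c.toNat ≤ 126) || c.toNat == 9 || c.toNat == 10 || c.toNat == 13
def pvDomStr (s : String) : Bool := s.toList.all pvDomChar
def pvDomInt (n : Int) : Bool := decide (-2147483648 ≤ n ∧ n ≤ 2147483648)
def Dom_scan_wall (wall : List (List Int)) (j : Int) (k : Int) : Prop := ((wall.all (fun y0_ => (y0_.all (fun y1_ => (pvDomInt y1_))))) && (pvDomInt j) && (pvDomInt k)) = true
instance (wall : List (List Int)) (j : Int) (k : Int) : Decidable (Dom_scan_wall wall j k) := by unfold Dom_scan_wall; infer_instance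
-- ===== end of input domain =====

-- B drops A's sort-and-scan entirely: it indexes the ribs by their (k,j) pair in a hash
-- map and gcds the run boundaries found by neighbour lookups (return-value equivalence;
-- neither implementation mutates its input).

-- Python's math.gcd of two ints (nonnegative result).
def g2 (a b : Int) : Int := ((Int.gcd a b : Nat) : Int)

-- ===== PORT A =====
-- A's for-loop over the sorted ribs, state (z0, running_gcd, l, x0), with the early 'return 1'.
def pvLoopA (xmin j k : Int) : List (List Int) → Option Int → Int → Int → Int → Int
  | [], _, g, l, _ => g2 l g
  | w :: rest, z0, g, l, x0 =>
    let wk := PySem.List.pyGetD w k 0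
    let wj := PySem.List.pyGetD w j 0
    if some wk ≠ z0 then
      let g' := g2 (g2 l g) (wj - xmin)
      if g' = 1 then 1 else pvLoopA xmin j k rest (some wk) g' 1 (wj + 1)
    else if wj ≠ x0 then
      let g' := g2 (g2 l g) (wj - x0)
      if g' = 1 then 1 else pvLoopA xmin j k rest z0 g' 1 (wj + 1)
    else
      if g = 1 then 1 else pvLoopA xmin j k rest z0 g (l + 1) (x0 + 1)

def scan_wall (wall : List (List Int)) (j : Int) (k : Int) : Int :=
  let srt := PySem.List.sorted2 wall (fun w => PySem.List.pyGetD w k 0) (fun w => PySem.List.pyGetD w j 0)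
  let xmin := (PySem.List.min? (wall.map (fun w => PySem.List.pyGetD w j 0)) (fun x => x)).getD 0
  pvLoopA xmin j k srt none 0 0 0

-- ===== PORT B =====
-- B's first loop: build the dict of (k,j) pairs; none = the early 'return 1' on a duplicate.
def pvSeen (j k : Int) : List (List Int) → PySem.Dict (Int × Int) Bool → Option (PySem.Dict (Int × Int) Bool)
  | [], seen => some seen
  | w :: rest, seen =>
    let p := (PySem.List.pyGetD w k 0, PySem.List.pyGetD w j 0)
    if seen.contains p then none else pvSeen j k rest (seen.insert p true)

def scan_wall_alt (wall : List (List Int)) (j : Int) (k : Int) : Int :=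
  let xmin := (PySem.List.min? (wall.map (fun w => PySem.List.pyGetD w j 0)) (fun x => x)).getD 0
  match pvSeen j k wall PySem.Dict.empty with
  | none => 1
  | some seen =>
      seen.keys.foldl (fun g p =>
        let g1 := if seen.contains (p.1, p.2 - 1) then g else g2 g (p.2 - xmin)
        if seen.contains (p.1, p.2 + 1) then g1 else g2 g1 (p.2 + 1 - xmin)) 0

-- ===== PRECONDITION & SPEC =====
-- Pre_ excludes exactly the crashes of A: empty wall (ValueError from min([])) and
-- rows where index j or k is out of Python range (IndexError).
def Pre_scan_wall (wall : List (List Int)) (j : Int) (k : Int) : Prop :=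
  wall ≠ [] ∧ ∀ w ∈ wall, PySem.Raise.InRange w.length j ∧ PySem.Raise.InRange w.length k
instance (wall : List (List Int)) (j : Int) (k : Int) : Decidable (Pre_scan_wall wall j k) := by
  unfold Pre_scan_wall; infer_instance

def pvWitness_scan_wall : List (List Int) × Int × Int := ([[0, 2], [0, 3], [1, 6]], 1, 0)

def Spec_scan_wall (wall : List (List Int)) (j : Int) (k : Int) (out : Int) : Prop := out = scan_wall_alt wall j k
instance (wall : List (List Int)) (j : Int) (k : Int) (out : Int) : Decidable (Spec_scan_wall wall j k out) := by unfold Spec_scan_wall; infer_instance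

-- ===== CLAIM (what is proved, stated in full; the proofs are below) =====
def Claim_equal_scan_wall : Prop := ∀ (wall : List (List Int)) (j : Int) (k : Int), Dom_scan_wall wall j k → Pre_scan_wall wall j k → Spec_scan_wall wall j k (scan_wall wall j k)

-- ===== LEMMAS AND PROOFS =====

theorem pvWitness_ok :
    Dom_scan_wall pvWitness_scan_wall.1 pvWitness_scan_wall.2.1 pvWitness_scan_wall.2.2 ∧
    Pre_scan_wall pvWitness_scan_wall.1 pvWitness_scan_wall.2.1 pvWitness_scan_wall.2.2 := by decide

-- ---------- gcd toolkit ----------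
def foldg (g : Int) (cs : List Int) : Int := cs.foldl g2 g

theorem foldg_nil (g : Int) : foldg g [] = g := rfl
theorem foldg_cons (g c : Int) (cs : List Int) : foldg g (c :: cs) = foldg (g2 g c) cs := rfl
theorem foldg_append (g : Int) (xs ys : List Int) : foldg g (xs ++ ys) = foldg (foldg g xs) ys := by
  simp [foldg, List.foldl_append]

theorem g2_eq_natCast (a b : Int) : g2 a b = ((Nat.gcd a.natAbs b.natAbs : Nat) : Int) := rfl

theorem g2_comm (a b : Int) : g2 a b = g2 b a := by
  simp [g2, Int.gcd_comm]

theorem g2_swap (t a b : Int) : g2 (g2 t a) b = g2 (g2 t b) a := by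
  simp only [g2_eq_natCast, Int.natAbs_natCast]
  rw [Nat.gcd_assoc, Nat.gcd_comm a.natAbs, ← Nat.gcd_assoc]

theorem g2_one (b : Int) : g2 1 b = 1 := by
  simp [g2, Int.gcd]

theorem g2_neg_one (t : Int) : g2 t (-1) = 1 := by
  simp [g2, Int.gcd]

theorem foldg_one (cs : List Int) : foldg 1 cs = 1 := by
  induction cs with
  | nil => rfl
  | cons c cs ih => rw [foldg_cons, g2_one]; exact ih

-- The key prefix-sum step: once a is folded in, folding (c - a) is the same as folding c.
theorem g2_step (t a c : Int) : g2 (g2 t a) (c - a) = g2 (g2 t a) c := by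
  have hna : (g2 t a) ∣ a := by simpa [g2] using Int.gcd_dvd_right t a
  have h1 : Int.gcd (g2 t a) (c - a) ∣ Int.gcd (g2 t a) c := by
    refine Int.dvd_gcd (Int.gcd_dvd_left _ _) ?_
    have h2 : ((Int.gcd (g2 t a) (c - a) : Nat) : Int) ∣ (c - a) := Int.gcd_dvd_right _ _
    have h3 : ((Int.gcd (g2 t a) (c - a) : Nat) : Int) ∣ a := dvd_trans (Int.gcd_dvd_left _ _) hna
    have := dvd_add h2 h3
    simpa using this
  have h4 : Int.gcd (g2 t a) c ∣ Int.gcd (g2 t a) (c - a) := by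
    refine Int.dvd_gcd (Int.gcd_dvd_left _ _) ?_
    have h2 : ((Int.gcd (g2 t a) c : Nat) : Int) ∣ c := Int.gcd_dvd_right _ _
    have h3 : ((Int.gcd (g2 t a) c : Nat) : Int) ∣ a := dvd_trans (Int.gcd_dvd_left _ _) hna
    exact dvd_sub h2 h3
  have h5 := Nat.dvd_antisymm h1 h4
  exact congrArg (fun n : Nat => (n : Int)) h5

-- Folding offsets relative to c equals folding offsets relative to d once (c - d) is in.
theorem foldg_shift (c d : Int) : ∀ (us : List Int) (t : Int),
    foldg (g2 t (c - d)) (us.map (fun u => u - c)) = foldg (g2 t (c - d)) (us.map (fun u => u - d)) := by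
  intro us
  induction us with
  | nil => intro t; rfl
  | cons u us ih =>
    intro t
    simp only [List.map_cons, foldg_cons]
    have h1 : g2 (g2 t (c - d)) (u - c) = g2 (g2 t (c - d)) (u - d) := by
      have : u - c = (u - d) - (c - d) := by ring
      rw [this, g2_step]
    rw [h1, g2_swap t (c - d) (u - d), ih (g2 t (u - d)), ← g2_swap t (c - d) (u - d)]

-- ---------- the boundary list of A's scan ----------
def keyf (j k : Int) (w : List Int) : Int × Int := (PySem.List.pyGetD w k 0, PySem.List.pyGetD w j 0)

-- boundaries (offsets from xmin) emitted by a (k,j)-scan from state (z0, expected x0)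
def bndK (xmin : Int) : List (Int × Int) → Int × Int → List Int
  | [], p => [p.2 - xmin]
  | q :: rest, p =>
    if p ≠ q then (p.2 - xmin) :: (q.2 - xmin) :: bndK xmin rest (q.1, q.2 + 1)
    else bndK xmin rest (q.1, q.2 + 1)

def pvBval (xmin j k : Int) (T : List (List Int)) (p : Int × Int) (G : Int) : Int :=
  foldg G (bndK xmin (T.map (keyf j k)) p)

theorem pvBval_nil (xmin j k : Int) (p : Int × Int) (G : Int) :
    pvBval xmin j k [] p G = g2 G (p.2 - xmin) := rfl

theorem pvBval_break (xmin j k : Int) (w : List Int) (T : List (List Int)) (p : Int × Int) (G : Int)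
    (h : p ≠ keyf j k w) :
    pvBval xmin j k (w :: T) p G
      = pvBval xmin j k T ((keyf j k w).1, (keyf j k w).2 + 1)
          (g2 (g2 G (p.2 - xmin)) ((keyf j k w).2 - xmin)) := by
  simp [pvBval, bndK, h, foldg_cons]

theorem pvBval_skip (xmin j k : Int) (w : List Int) (T : List (List Int)) (p : Int × Int) (G : Int)
    (h : p = keyf j k w) :
    pvBval xmin j k (w :: T) p G
      = pvBval xmin j k T ((keyf j k w).1, (keyf j k w).2 + 1) G := by
  simp [pvBval, bndK, h]

theorem bndK_shape (xmin : Int) : ∀ (T : List (Int × Int)) (p : Int × Int),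
    ∃ ps : List Int, bndK xmin T p = ps.map (fun u => u - xmin) := by
  intro T
  induction T with
  | nil => intro p; exact ⟨[p.2], rfl⟩
  | cons q rest ih =>
    intro p
    by_cases h : p ≠ q
    · obtain ⟨ps, hps⟩ := ih (q.1, q.2 + 1)
      exact ⟨p.2 :: q.2 :: ps, by simp [bndK, h, hps]⟩
    · obtain ⟨ps, hps⟩ := ih (q.1, q.2 + 1)
      exact ⟨ps, by simp [bndK, h, hps]⟩

-- ---------- A's loop equals the boundary-list gcd (with early return absorbed) ----------
def pvInvar (g G s xmin : Int) : Prop :=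
  ∀ us : List Int, foldg g (us.map (fun u => u - s)) = foldg G (us.map (fun u => u - xmin))

theorem pvinv_one (g G s xmin : Int) (hInv : pvInvar g G s xmin) (hg : g = 1) :
    ∀ us : List Int, foldg G (us.map (fun u => u - xmin)) = 1 := by
  intro us
  have h := hInv us
  rw [hg, foldg_one] at h
  exact h.symm

theorem pvinv_use (g G s xmin : Int) (hInv : pvInvar g G s xmin) (vs ts : List Int) :
    foldg g (vs.map (fun u => u - s) ++ ts) = foldg G (vs.map (fun u => u - xmin) ++ ts) := by
  rw [foldg_append, foldg_append, hInv vs]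

theorem inv_init (wj xmin : Int) : pvInvar (g2 (g2 0 0) (wj - xmin)) (g2 0 (wj - xmin)) wj xmin := by
  intro us
  have h0 : g2 (0 : Int) 0 = 0 := by simp [g2, Int.gcd]
  rw [h0]
  exact foldg_shift wj xmin us 0

theorem inv_new (g G l x0 wj xmin : Int) (hInv : pvInvar g G (x0 - l) xmin) :
    pvInvar (g2 (g2 l g) (wj - xmin)) (g2 (g2 G (x0 - xmin)) (wj - xmin)) wj xmin := by
  intro us
  rw [foldg_shift wj xmin us (g2 l g)]
  calc foldg (g2 (g2 l g) (wj - xmin)) (us.map (fun u => u - xmin))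
      = foldg g ([x0].map (fun u => u - (x0 - l)) ++ ((wj - xmin) :: us.map (fun u => u - xmin))) := by
        simp only [List.map_cons, List.map_nil, foldg_append, foldg_cons, foldg_nil]
        rw [show x0 - (x0 - l) = l from by ring, g2_comm g l]
    _ = foldg G ([x0].map (fun u => u - xmin) ++ ((wj - xmin) :: us.map (fun u => u - xmin))) :=
        pvinv_use g G (x0 - l) xmin hInv [x0] _
    _ = foldg (g2 (g2 G (x0 - xmin)) (wj - xmin)) (us.map (fun u => u - xmin)) := by
        simp only [List.map_cons, List.map_nil, foldg_append, foldg_cons, foldg_nil]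

theorem inv_gap (g G l x0 wj xmin : Int) (hInv : pvInvar g G (x0 - l) xmin) :
    pvInvar (g2 (g2 l g) (wj - x0)) (g2 (g2 G (x0 - xmin)) (wj - xmin)) wj xmin := by
  intro us
  set s := x0 - l with hs
  rw [foldg_shift wj x0 us (g2 l g)]
  have hX : g2 (g2 l g) (wj - x0) = g2 (g2 g (x0 - s)) (wj - s) := by
    rw [g2_comm l g, show l = x0 - s from by rw [hs]; ring,
        show wj - x0 = (wj - s) - (x0 - s) from by ring, g2_step]
  rw [hX]
  have e2 : foldg (g2 (g2 g (x0 - s)) (wj - s)) (us.map (fun u => u - x0))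
          = foldg (g2 (g2 g (x0 - s)) (wj - s)) (us.map (fun u => u - s)) := by
    rw [g2_swap g (x0 - s) (wj - s)]
    exact foldg_shift x0 s us (g2 g (wj - s))
  rw [e2]
  calc foldg (g2 (g2 g (x0 - s)) (wj - s)) (us.map (fun u => u - s))
      = foldg g ((x0 :: wj :: us).map (fun u => u - s)) := by
        simp only [List.map_cons, foldg_cons]
    _ = foldg G ((x0 :: wj :: us).map (fun u => u - xmin)) := hInv _
    _ = foldg (g2 (g2 G (x0 - xmin)) (wj - xmin)) (us.map (fun u => u - xmin)) := by
        simp only [List.map_cons, foldg_cons]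

theorem bval_of_one (xmin j k : Int) (T : List (List Int)) (p : Int × Int) (G : Int)
    (h : ∀ us : List Int, foldg G (us.map (fun u => u - xmin)) = 1) :
    pvBval xmin j k T p G = 1 := by
  obtain ⟨ps, hps⟩ := bndK_shape xmin (T.map (keyf j k)) p
  rw [pvBval, hps, h]

theorem main_sim (xmin j k : Int) : ∀ (rest : List (List Int)) (zk g l x0 G : Int),
    pvInvar g G (x0 - l) xmin →
    pvLoopA xmin j k rest (some zk) g l x0 = pvBval xmin j k rest (zk, x0) G := by
  intro rest
  induction rest with
  | nil =>
    intro zk g l x0 G hInv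
    have h := hInv [x0]
    simp only [List.map_cons, List.map_nil, foldg_cons, foldg_nil] at h
    rw [show x0 - (x0 - l) = l from by ring] at h
    rw [pvBval_nil]
    simpa [pvLoopA, g2_comm l g] using h
  | cons w rest ih =>
    intro zk g l x0 G hInv
    simp only [pvLoopA]
    set wk := PySem.List.pyGetD w k 0 with hwk
    set wj := PySem.List.pyGetD w j 0 with hwj
    have hkey : keyf j k w = (wk, wj) := rfl
    by_cases hk : wk = zk
    · by_cases hx : wj = x0
      · -- continuation of the run
        have hp : (zk, x0) = keyf j k w := by rw [hkey, hk, hx]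
        rw [if_neg (by simp [hk] : ¬ some wk ≠ some zk), if_neg (by simpa using hx),
            pvBval_skip xmin j k w rest _ G hp]
        by_cases hg : g = 1
        · rw [if_pos hg]
          exact (bval_of_one xmin j k rest _ G (pvinv_one g G (x0 - l) xmin hInv hg)).symm
        · rw [if_neg hg]
          have hInv' : pvInvar g G (x0 + 1 - (l + 1)) xmin := by
            rw [show x0 + 1 - (l + 1) = x0 - l from by ring]; exact hInv
          have := ih zk g (l + 1) (x0 + 1) G hInv'
          rw [hkey]
          simpa [hk, hx] using this
      · -- gap inside the group
        have hp : (zk, x0) ≠ keyf j k w := by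
          rw [hkey]; intro hcon
          have h2 := congrArg Prod.snd hcon
          simp only [] at h2
          exact hx h2.symm
        rw [if_neg (by simp [hk] : ¬ some wk ≠ some zk), if_pos hx,
            pvBval_break xmin j k w rest _ G hp]
        have hInv' := inv_gap g G l x0 wj xmin hInv
        by_cases hg : g2 (g2 l g) (wj - x0) = 1
        · rw [if_pos hg]
          exact (bval_of_one xmin j k rest _ _ (pvinv_one _ _ wj xmin hInv' hg)).symm
        · rw [if_neg hg]
          have hInv'' : pvInvar (g2 (g2 l g) (wj - x0)) (g2 (g2 G (x0 - xmin)) (wj - xmin)) (wj + 1 - 1) xmin := by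
            rw [show wj + 1 - 1 = wj from by ring]; exact hInv'
          have := ih zk (g2 (g2 l g) (wj - x0)) 1 (wj + 1) _ hInv''
          rw [hkey]
          simpa [hk] using this
    · -- new k-group
      have hp : (zk, x0) ≠ keyf j k w := by
        rw [hkey]; intro hcon
        have h2 := congrArg Prod.fst hcon
        simp only [] at h2
        exact hk h2.symm
      rw [if_pos (by simpa using hk : some wk ≠ some zk),
          pvBval_break xmin j k w rest _ G hp]
      have hInv' := inv_new g G l x0 wj xmin hInv
      by_cases hg : g2 (g2 l g) (wj - xmin) = 1
      · rw [if_pos hg]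
        exact (bval_of_one xmin j k rest _ _ (pvinv_one _ _ wj xmin hInv' hg)).symm
      · rw [if_neg hg]
        have hInv'' : pvInvar (g2 (g2 l g) (wj - xmin)) (g2 (g2 G (x0 - xmin)) (wj - xmin)) (wj + 1 - 1) xmin := by
          rw [show wj + 1 - 1 = wj from by ring]; exact hInv'
        have := ih wk (g2 (g2 l g) (wj - xmin)) 1 (wj + 1) _ hInv''
        rw [hkey]
        exact this

-- A on a nonempty sorted list = gcd of the boundary list
theorem scanA_bnd (xmin j k : Int) (w : List Int) (rest : List (List Int)) :
    pvLoopA xmin j k (w :: rest) none 0 0 0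
      = foldg (g2 0 ((keyf j k w).2 - xmin)) (bndK xmin (rest.map (keyf j k)) ((keyf j k w).1, (keyf j k w).2 + 1)) := by
  simp only [pvLoopA]
  set wk := PySem.List.pyGetD w k 0 with hwk
  set wj := PySem.List.pyGetD w j 0 with hwj
  have hkey : keyf j k w = (wk, wj) := rfl
  rw [if_pos (by simp : some wk ≠ (none : Option Int))]
  have h00 : g2 (g2 0 0) (wj - xmin) = g2 0 (wj - xmin) := by
    norm_num [g2, Int.gcd]
  have hInv1 := inv_init wj xmin
  by_cases hg : g2 (g2 0 0) (wj - xmin) = 1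
  · rw [if_pos hg]
    have h1 : ∀ us : List Int, foldg (g2 0 (wj - xmin)) (us.map (fun u => u - xmin)) = 1 :=
      pvinv_one _ _ wj xmin hInv1 hg
    obtain ⟨ps, hps⟩ := bndK_shape xmin (rest.map (keyf j k)) ((keyf j k w).1, (keyf j k w).2 + 1)
    rw [hkey] at hps ⊢
    rw [hps, ← h00, hg, foldg_one]
  · rw [if_neg hg]
    have hInv'' : pvInvar (g2 (g2 0 0) (wj - xmin)) (g2 0 (wj - xmin)) (wj + 1 - 1) xmin := by
      rw [show wj + 1 - 1 = wj from by ring]; exact hInv1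
    have := main_sim xmin j k rest wk (g2 (g2 0 0) (wj - xmin)) 1 (wj + 1) _ hInv''
    rw [hkey]
    exact this

-- ---------- lexicographic order on (k,j) keys ----------
def leKey (a b : Int × Int) : Prop := a.1 < b.1 ∨ (a.1 = b.1 ∧ a.2 ≤ b.2)
def ltKey (a b : Int × Int) : Prop := a.1 < b.1 ∨ (a.1 = b.1 ∧ a.2 < b.2)

theorem leKey_mk {a1 a2 b1 b2 : Int} : leKey (a1, a2) (b1, b2) ↔ (a1 < b1 ∨ (a1 = b1 ∧ a2 ≤ b2)) := Iff.rfl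
theorem ltKey_mk {a1 a2 b1 b2 : Int} : ltKey (a1, a2) (b1, b2) ↔ (a1 < b1 ∨ (a1 = b1 ∧ a2 < b2)) := Iff.rfl

theorem ltKey_trans {a b c : Int × Int} (h1 : ltKey a b) (h2 : ltKey b c) : ltKey a c := by
  obtain ⟨a1, a2⟩ := a; obtain ⟨b1, b2⟩ := b; obtain ⟨c1, c2⟩ := c
  simp only [ltKey] at *; omega

theorem ltKey_irrefl (a : Int × Int) : ¬ ltKey a a := by
  obtain ⟨a1, a2⟩ := a; simp only [ltKey]; omega

theorem leKey_antisymm {a b : Int × Int} (h1 : leKey a b) (h2 : leKey b a) : a = b := by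
  obtain ⟨a1, a2⟩ := a; obtain ⟨b1, b2⟩ := b
  simp only [leKey] at *
  simp only [Prod.mk.injEq]
  omega

-- ---------- pairwise order of the sorted list ----------
theorem insertBy_pw {α : Type} (R : α → α → Prop) (bf : α → α → Bool)
    (htr : ∀ {a b c}, R a b → R b c → R a c)
    (h1 : ∀ a b, bf a b = true → R a b) (h2 : ∀ a b, bf a b = false → R b a) (x : α) :
    ∀ ys : List α, ys.Pairwise R → (PySem.List.insertBy bf x ys).Pairwise R := by
  intro ys
  induction ys with
  | nil => intro _; simp [PySem.List.insertBy]
  | cons y ys ih =>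
    intro hpw
    rw [List.pairwise_cons] at hpw
    obtain ⟨hy, hys⟩ := hpw
    by_cases hb : bf x y = true
    · rw [show PySem.List.insertBy bf x (y :: ys) = x :: y :: ys from by simp [PySem.List.insertBy, hb]]
      refine List.Pairwise.cons ?_ (List.Pairwise.cons hy hys)
      intro t ht
      rcases List.mem_cons.mp ht with h | h
      · rw [h]; exact h1 x y hb
      · exact htr (h1 x y hb) (hy t h)
    · rw [show PySem.List.insertBy bf x (y :: ys) = y :: PySem.List.insertBy bf x ys from by
        simp [PySem.List.insertBy, hb]]
      refine List.Pairwise.cons ?_ (ih hys)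
      intro t ht
      rcases (PySem.List.mem_insertBy bf x t ys).mp ht with h | h
      · rw [h]; exact h2 x y (by simpa using hb)
      · exact hy t h

theorem foldl_insertBy_pw {α : Type} (R : α → α → Prop) (bf : α → α → Bool)
    (htr : ∀ {a b c}, R a b → R b c → R a c)
    (h1 : ∀ a b, bf a b = true → R a b) (h2 : ∀ a b, bf a b = false → R b a) :
    ∀ (xs acc : List α), acc.Pairwise R →
      (xs.foldl (fun acc x => PySem.List.insertBy bf x acc) acc).Pairwise R := by
  intro xs
  induction xs with
  | nil => intro acc h; exact h
  | cons x xs ih =>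
    intro acc h
    exact ih _ (insertBy_pw R bf htr h1 h2 x acc h)

theorem sorted2_pairwise_le (wall : List (List Int)) (j k : Int) :
    (PySem.List.sorted2 wall (fun w => PySem.List.pyGetD w k 0) (fun w => PySem.List.pyGetD w j 0)).Pairwise
      (fun a b => leKey (keyf j k a) (keyf j k b)) := by
  have : PySem.List.sorted2 wall (fun w => PySem.List.pyGetD w k 0) (fun w => PySem.List.pyGetD w j 0)
      = wall.foldl (fun acc x => PySem.List.insertBy
          (fun a b => decide (PySem.List.pyGetD a k 0 < PySem.List.pyGetD b k 0) ||
            (!decide (PySem.List.pyGetD b k 0 < PySem.List.pyGetD a k 0) &&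
              decide (PySem.List.pyGetD a j 0 < PySem.List.pyGetD b j 0))) x acc) [] := rfl
  rw [this]
  refine foldl_insertBy_pw _ _ ?_ ?_ ?_ wall [] (by simp)
  · intro a b c hab hbc
    simp only [keyf, leKey] at *; omega
  · intro a b h
    simp only [Bool.or_eq_true, Bool.and_eq_true, Bool.not_eq_eq_eq_not, Bool.not_true,
      decide_eq_true_eq, decide_eq_false_iff_not] at h
    simp only [keyf, leKey]
    omega
  · intro a b h
    simp only [Bool.or_eq_false_iff, Bool.and_eq_false_iff, Bool.not_eq_eq_eq_not, Bool.not_false,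
      decide_eq_false_iff_not, decide_eq_true_eq] at h
    simp only [keyf, leKey]
    omega

-- ---------- duplicate case: both sides return 1 ----------
def adjDup : List (Int × Int) → Prop
  | [] => False
  | [_] => False
  | p :: q :: r => p = q ∨ adjDup (q :: r)

theorem adjDup_of_pairwise_not_nodup : ∀ K : List (Int × Int),
    K.Pairwise leKey → ¬ K.Nodup → adjDup K := by
  intro K
  induction K with
  | nil => intro _ h; exact absurd List.nodup_nil h
  | cons p rest ih =>
    intro hpw hnd
    rw [List.pairwise_cons] at hpw
    obtain ⟨hp, hrest⟩ := hpw
    cases rest with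
    | nil => exact absurd (by simp) hnd
    | cons q r =>
      by_cases hmem : p ∈ q :: r
      · have h1 : leKey p q := hp q (by simp)
        have h2 : leKey q p := by
          rcases List.mem_cons.mp hmem with h | h
          · rw [h]; right; exact ⟨rfl, le_refl _⟩
          · exact (List.pairwise_cons.mp hrest).1 p h
        exact Or.inl (leKey_antisymm h1 h2)
      · have : ¬ (q :: r).Nodup := by
          intro hc
          exact hnd (List.nodup_cons.mpr ⟨hmem, hc⟩)
        exact Or.inr (ih hrest this)

theorem loop_dup (xmin j k : Int) : ∀ (T : List (List Int)) (z0 g l x0 : Int),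
    (adjDup (T.map (keyf j k)) ∨ (∃ w T', T = w :: T' ∧ keyf j k w = (z0, x0 - 1))) →
    pvLoopA xmin j k T (some z0) g l x0 = 1 := by
  intro T
  induction T with
  | nil =>
    intro z0 g l x0 h
    rcases h with h | ⟨w, T', h, _⟩
    · exact absurd h (by simp [adjDup])
    · exact absurd h (by simp)
  | cons w rest ih =>
    intro z0 g l x0 h
    simp only [pvLoopA]
    set wk := PySem.List.pyGetD w k 0 with hwk
    set wj := PySem.List.pyGetD w j 0 with hwj
    have hkey : keyf j k w = (wk, wj) := rfl
    rcases h with hadj | ⟨w', T', heq, hpend⟩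
    · -- adjacent duplicate somewhere in w :: rest
      cases rest with
      | nil => exact absurd hadj (by simp [adjDup])
      | cons w2 r =>
        have hnext : keyf j k w = keyf j k w2 ∨ adjDup ((w2 :: r).map (keyf j k)) := by
          simpa [adjDup] using hadj
        have harg : adjDup ((w2 :: r).map (keyf j k)) ∨
            (∃ u T', w2 :: r = u :: T' ∧ keyf j k u = (wk, (wj + 1) - 1)) := by
          rcases hnext with h | h
          · right; exact ⟨w2, r, rfl, by rw [← h, hkey]; congr 1; ring⟩
          · left; exact h
        by_cases hk : some wk ≠ some z0
        · rw [if_pos hk]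
          by_cases hg : g2 (g2 l g) (wj - xmin) = 1
          · rw [if_pos hg]
          · rw [if_neg hg]; exact ih wk (g2 (g2 l g) (wj - xmin)) 1 (wj + 1) harg
        · rw [if_neg hk]
          have hz : wk = z0 := by simpa using hk
          by_cases hx : wj ≠ x0
          · rw [if_pos hx]
            by_cases hg : g2 (g2 l g) (wj - x0) = 1
            · rw [if_pos hg]
            · rw [if_neg hg]
              exact ih z0 (g2 (g2 l g) (wj - x0)) 1 (wj + 1) (by rw [← hz]; exact harg)
          · rw [if_neg hx]
            have hx' : wj = x0 := by simpa using hx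
            by_cases hg : g = 1
            · rw [if_pos hg]
            · rw [if_neg hg]
              have harg' : adjDup ((w2 :: r).map (keyf j k)) ∨
                  (∃ u T', w2 :: r = u :: T' ∧ keyf j k u = (z0, (x0 + 1) - 1)) := by
                rcases harg with h | ⟨u, T', he, hu⟩
                · left; exact h
                · right; exact ⟨u, T', he, by rw [hu, hz, hx']⟩
              exact ih z0 g (l + 1) (x0 + 1) harg'
    · -- the head is the pending duplicate of the previous element
      have hw : keyf j k w = (z0, x0 - 1) := by
        injection heq with h1 h2
        rw [h1]; exact hpend
      have hzk : wk = z0 := by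
        have := congrArg Prod.fst hw
        simpa [hkey] using this
      have hxj : wj = x0 - 1 := by
        have := congrArg Prod.snd hw
        simpa [hkey] using this
      rw [if_neg (by simp [hzk] : ¬ some wk ≠ some z0)]
      rw [if_pos (by rw [hxj]; intro hc; omega : wj ≠ x0)]
      have hg1 : g2 (g2 l g) (wj - x0) = 1 := by
        rw [hxj, show x0 - 1 - x0 = -1 from by ring, g2_neg_one]
      rw [if_pos hg1]

-- pvSeen: success and failure characterised by the key list
theorem seen_keys (j k : Int) : ∀ (L : List (List Int)) (d : PySem.Dict (Int × Int) Bool),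
    (d.keys ++ L.map (keyf j k)).Nodup →
    ∃ d', pvSeen j k L d = some d' ∧ d'.keys = d.keys ++ L.map (keyf j k) := by
  intro L
  induction L with
  | nil => intro d _; exact ⟨d, rfl, by simp⟩
  | cons w rest ih =>
    intro d hnd
    have hp : keyf j k w ∉ d.keys := by
      intro hc
      have hdisj := (List.nodup_append.mp hnd).2.2
      exact hdisj (keyf j k w) hc (keyf j k w) (by simp) rfl
    have hcont : d.contains (keyf j k w) = false := by
      rw [PySem.Dict.contains_eq_decide_mem_keys]
      simpa using hp
    simp only [pvSeen]
    rw [show ((PySem.List.pyGetD w k 0, PySem.List.pyGetD w j 0) : Int × Int) = keyf j k w from rfl,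
        hcont]
    simp only [Bool.false_eq_true, if_false]
    have hkeys : (d.insert (keyf j k w) true).keys = d.keys ++ [keyf j k w] :=
      PySem.Dict.keys_insert_of_not_contains d true hcont
    have hnd' : ((d.insert (keyf j k w) true).keys ++ rest.map (keyf j k)).Nodup := by
      rw [hkeys, List.append_assoc]
      simpa using hnd
    obtain ⟨d', hd', hk'⟩ := ih _ hnd'
    exact ⟨d', hd', by rw [hk', hkeys, List.append_assoc]; simp⟩

theorem seen_none (j k : Int) : ∀ (L : List (List Int)) (d : PySem.Dict (Int × Int) Bool),
    d.keys.Nodup → ¬ (d.keys ++ L.map (keyf j k)).Nodup →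
    pvSeen j k L d = none := by
  intro L
  induction L with
  | nil =>
    intro d hnd hc
    exact absurd (by simpa using hnd) hc
  | cons w rest ih =>
    intro d hnd hc
    simp only [pvSeen]
    rw [show ((PySem.List.pyGetD w k 0, PySem.List.pyGetD w j 0) : Int × Int) = keyf j k w from rfl]
    by_cases hm : keyf j k w ∈ d.keys
    · rw [PySem.Dict.contains_eq_decide_mem_keys]
      simp [hm]
    · have hcont : d.contains (keyf j k w) = false := by
        rw [PySem.Dict.contains_eq_decide_mem_keys]; simpa using hm
      rw [hcont]
      simp only [Bool.false_eq_true, if_false]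
      have hkeys : (d.insert (keyf j k w) true).keys = d.keys ++ [keyf j k w] :=
        PySem.Dict.keys_insert_of_not_contains d true hcont
      refine ih _ ?_ ?_
      · rw [hkeys]
        refine List.Nodup.append hnd (by simp) ?_
        intro a ha hb
        simp only [List.mem_singleton] at hb
        subst hb
        exact hm ha
      · rw [hkeys, List.append_assoc]
        intro hcc
        exact hc (by simpa using hcc)

-- ---------- the membership characterisation of the boundaries ----------
def contribC (S : List (Int × Int)) (xmin : Int) (q : Int × Int) : List Int :=
  (if (q.1, q.2 - 1) ∈ S then [] else [q.2 - xmin]) ++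
  (if (q.1, q.2 + 1) ∈ S then [] else [q.2 + 1 - xmin])

theorem bnd_contrib (S : List (Int × Int)) (xmin : Int) :
    ∀ (T : List (Int × Int)) (z0 x0 : Int),
    T.Pairwise ltKey →
    (∀ q ∈ T, ltKey (z0, x0 - 1) q) →
    (z0, x0 - 1) ∈ S →
    (∀ q ∈ S, ltKey (z0, x0 - 1) q → q ∈ T) →
    (∀ q ∈ T, q ∈ S) →
    bndK xmin T (z0, x0) = (if (z0, x0) ∈ S then [] else [x0 - xmin]) ++ T.flatMap (contribC S xmin) := by
  intro T
  induction T with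
  | nil =>
    intro z0 x0 _ _ _ hc2 _
    have hnot : ((z0, x0) : Int × Int) ∉ S := by
      intro hc
      have hlt : ltKey (z0, x0 - 1) (z0, x0) := ltKey_mk.mpr (by omega)
      exact List.not_mem_nil (hc2 _ hc hlt)
    simp [bndK, hnot]
  | cons q rest ih =>
    intro z0 x0 hpw hall hc1 hc2 hsub
    obtain ⟨z, x⟩ := q
    rw [List.pairwise_cons] at hpw
    obtain ⟨hhead, hpwr⟩ := hpw
    have hlt0 : ltKey (z0, x0 - 1) (z, x) := hall _ (by simp)
    have hlt0' : z0 < z ∨ (z0 = z ∧ x0 - 1 < x) := ltKey_mk.mp hlt0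
    have e11 : (x + 1 - 1 : Int) = x := by ring
    have hih := ih z (x + 1)
      hpwr
      (fun q hq => by rw [e11]; exact hhead q hq)
      (by rw [e11]; exact hsub (z, x) (by simp))
      (fun q hq hlt => by
        rw [e11] at hlt
        have h1 : ltKey (z0, x0 - 1) q := ltKey_trans hlt0 hlt
        rcases List.mem_cons.mp (hc2 q hq h1) with h | h
        · rw [h] at hlt; exact absurd hlt (ltKey_irrefl _)
        · exact h)
      (fun q hq => hsub q (by simp [hq]))
    by_cases heq : ((z0, x0) : Int × Int) = (z, x)
    · -- run continues
      have hmem : ((z0, x0) : Int × Int) ∈ S := by rw [heq]; exact hsub (z, x) (by simp)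
      have hpred : ((z, x - 1) : Int × Int) ∈ S := by
        have he : ((z, x - 1) : Int × Int) = (z0, x0 - 1) := by
          injection heq with h1 h2
          rw [h1, h2]
        rw [he]; exact hc1
      rw [show bndK xmin ((z, x) :: rest) (z0, x0) = bndK xmin rest (z, x + 1) from by
            simp [bndK, heq]]
      rw [hih]
      simp [contribC, hpred, hmem]
    · -- break: close the old run, open a new one
      have hne : ¬ (z0 = z ∧ x0 = x) := by
        intro hc
        exact heq (by rw [hc.1, hc.2])
      have hnotmem : ((z0, x0) : Int × Int) ∉ S := by
        intro hc
        have hl : ltKey (z0, x0 - 1) (z0, x0) := ltKey_mk.mpr (by omega)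
        rcases List.mem_cons.mp (hc2 _ hc hl) with h | h
        · exact heq h
        · have h2 : z < z0 ∨ (z = z0 ∧ x < x0) := ltKey_mk.mp (hhead _ h)
          omega
      have hpred : ((z, x - 1) : Int × Int) ∉ S := by
        intro hc
        have hlt : ltKey (z0, x0 - 1) (z, x - 1) := ltKey_mk.mpr (by omega)
        rcases List.mem_cons.mp (hc2 _ hc hlt) with h | h
        · injection h with h1 h2; omega
        · have h2 : z < z ∨ (z = z ∧ x < x - 1) := ltKey_mk.mp (hhead _ h)
          omega
      rw [show bndK xmin ((z, x) :: rest) (z0, x0)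
            = (x0 - xmin) :: (x - xmin) :: bndK xmin rest (z, x + 1) from by
            simp [bndK, heq]]
      rw [hih]
      simp [contribC, hpred, hnotmem]

-- ---------- B's fold equals the contribution-list gcd ----------
def pvFoldB (seen : PySem.Dict (Int × Int) Bool) (xmin : Int) : Int :=
  seen.keys.foldl (fun g p =>
    let g1 := if seen.contains (p.1, p.2 - 1) then g else g2 g (p.2 - xmin)
    if seen.contains (p.1, p.2 + 1) then g1 else g2 g1 (p.2 + 1 - xmin)) 0

theorem alt_of_some (wall : List (List Int)) (j k : Int) (seen : PySem.Dict (Int × Int) Bool)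
    (h : pvSeen j k wall PySem.Dict.empty = some seen) :
    scan_wall_alt wall j k
      = pvFoldB seen ((PySem.List.min? (wall.map (fun w => PySem.List.pyGetD w j 0)) (fun x => x)).getD 0) := by
  simp only [scan_wall_alt, h, pvFoldB]

theorem alt_of_none (wall : List (List Int)) (j k : Int)
    (h : pvSeen j k wall PySem.Dict.empty = none) :
    scan_wall_alt wall j k = 1 := by
  simp only [scan_wall_alt, h]

theorem foldB_fold (seen : PySem.Dict (Int × Int) Bool) (S : List (Int × Int)) (xmin : Int)
    (hS : ∀ q, seen.contains q = decide (q ∈ S)) :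
    ∀ (L : List (Int × Int)) (g : Int),
    L.foldl (fun g p =>
        let g1 := if seen.contains (p.1, p.2 - 1) then g else g2 g (p.2 - xmin)
        if seen.contains (p.1, p.2 + 1) then g1 else g2 g1 (p.2 + 1 - xmin)) g
      = foldg g (L.flatMap (contribC S xmin)) := by
  intro L
  induction L with
  | nil => intro g; rfl
  | cons p rest ih =>
    intro g
    rw [List.foldl_cons, List.flatMap_cons, foldg_append, ih]
    congr 1
    simp only [hS, contribC]
    by_cases h1 : (p.1, p.2 - 1) ∈ S <;> by_cases h2 : (p.1, p.2 + 1) ∈ S <;>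
      simp [h1, h2, foldg]

theorem foldB_eq (seen : PySem.Dict (Int × Int) Bool) (S : List (Int × Int)) (xmin : Int)
    (hS : ∀ q, seen.contains q = decide (q ∈ S)) :
    pvFoldB seen xmin = foldg 0 (seen.keys.flatMap (contribC S xmin)) :=
  foldB_fold seen S xmin hS seen.keys 0

theorem contrib_congr (S1 S2 : List (Int × Int)) (xmin : Int)
    (h : ∀ x, x ∈ S1 ↔ x ∈ S2) (q : Int × Int) :
    contribC S1 xmin q = contribC S2 xmin q := by
  unfold contribC
  rw [if_congr (h _) rfl rfl, if_congr (h _) rfl rfl]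

theorem foldg_perm {xs ys : List Int} (h : xs.Perm ys) (g : Int) : foldg g xs = foldg g ys := by
  haveI : RightCommutative g2 := ⟨g2_swap⟩
  exact h.foldl_eq g

-- ---------- the main equivalence ----------
theorem scan_equiv (wall : List (List Int)) (j : Int) (k : Int) :
    scan_wall wall j k = scan_wall_alt wall j k := by
  classical
  set xmin := (PySem.List.min? (wall.map (fun w => PySem.List.pyGetD w j 0)) (fun x => x)).getD 0 with hxmin
  set srt := PySem.List.sorted2 wall (fun w => PySem.List.pyGetD w k 0) (fun w => PySem.List.pyGetD w j 0) with hsrt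
  have hA : scan_wall wall j k = pvLoopA xmin j k srt none 0 0 0 := rfl
  rw [hA]
  have hperm : srt.Perm wall := PySem.List.sorted2_perm _ _ _ _
  have hpermK : (srt.map (keyf j k)).Perm (wall.map (keyf j k)) := hperm.map _
  have hpwle : (srt.map (keyf j k)).Pairwise (fun a b => leKey a b) := by
    rw [hsrt, List.pairwise_map]
    exact sorted2_pairwise_le wall j k
  by_cases hnd : (wall.map (keyf j k)).Nodup
  · -- no duplicate (k, j) pair
    obtain ⟨seen, hseen, hkeys⟩ := seen_keys j k wall PySem.Dict.empty (by simpa using hnd)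
    rw [alt_of_some wall j k seen hseen]
    have hkeys' : seen.keys = wall.map (keyf j k) := by simpa using hkeys
    have hcontains : ∀ q, seen.contains q = decide (q ∈ wall.map (keyf j k)) := fun q => by
      rw [PySem.Dict.contains_eq_decide_mem_keys, hkeys']
    rw [foldB_eq seen (wall.map (keyf j k)) xmin hcontains, hkeys']
    have hndK : (srt.map (keyf j k)).Nodup := hpermK.nodup_iff.mpr hnd
    have hpwlt : (srt.map (keyf j k)).Pairwise ltKey := by
      have hneq : (srt.map (keyf j k)).Pairwise (fun a b => a ≠ b) := hndK
      refine (hpwle.and hneq).imp ?_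
      intro a b h
      obtain ⟨a1, a2⟩ := a
      obtain ⟨b1, b2⟩ := b
      obtain ⟨h1, h2⟩ := h
      have h1' : a1 < b1 ∨ (a1 = b1 ∧ a2 ≤ b2) := leKey_mk.mp h1
      have h2' : ¬ (a1 = b1 ∧ a2 = b2) := by
        intro hc
        exact h2 (by rw [hc.1, hc.2])
      exact ltKey_mk.mpr (by omega)
    cases hsl : srt with
    | nil =>
      have hw : wall = [] := ((hsl ▸ hperm).symm).eq_nil
      rw [hw]
      simp [pvLoopA, foldg, g2, Int.gcd]
    | cons w rest =>
      rw [scanA_bnd]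
      rw [hsl] at hpwlt hndK hpermK
      set z1 := (keyf j k w).1 with hz1
      set x1 := (keyf j k w).2 with hx1
      have hp1 : ((z1, x1) : Int × Int) = keyf j k w := rfl
      set T : List (Int × Int) := rest.map (keyf j k) with hT
      set K : List (Int × Int) := keyf j k w :: T with hK
      have hKmap : (w :: rest).map (keyf j k) = K := by simp [hK, hT]
      rw [hKmap] at hpwlt hndK hpermK
      have hpwT : T.Pairwise ltKey := (List.pairwise_cons.mp hpwlt).2
      have hheadT : ∀ q ∈ T, ltKey (keyf j k w) q := (List.pairwise_cons.mp hpwlt).1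
      have e11 : (x1 + 1 - 1 : Int) = x1 := by ring
      have hcontrib := bnd_contrib K xmin T z1 (x1 + 1)
        hpwT
        (by intro q hq; rw [e11, hp1]; exact hheadT q hq)
        (by rw [e11, hp1]; exact List.mem_cons_self ..)
        (by
          intro q hq hlt
          rw [e11, hp1] at hlt
          rcases List.mem_cons.mp hq with h | h
          · rw [h] at hlt; exact absurd hlt (ltKey_irrefl _)
          · exact h)
        (by intro q hq; exact List.mem_cons_of_mem _ hq)
      have hpred1 : ((z1, x1 - 1) : Int × Int) ∉ K := by
        intro hc
        rcases List.mem_cons.mp hc with h | h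
        · rw [← hp1] at h
          injection h with h1 h2
          omega
        · have h2 := hheadT _ h
          rw [← hp1] at h2
          have := ltKey_mk.mp h2
          omega
      calc foldg (g2 0 (x1 - xmin)) (bndK xmin T (z1, x1 + 1))
          = foldg 0 ((x1 - xmin) :: bndK xmin T (z1, x1 + 1)) := (foldg_cons 0 _ _).symm
        _ = foldg 0 (K.flatMap (contribC K xmin)) := by
            rw [hcontrib, hK, List.flatMap_cons, ← hp1]
            show foldg 0 ((x1 - xmin) :: ((if ((z1, x1 + 1) : Int × Int) ∈ K then [] else [x1 + 1 - xmin]) ++ T.flatMap (contribC K xmin)))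
               = foldg 0 (contribC K xmin (z1, x1) ++ T.flatMap (contribC K xmin))
            rw [show contribC K xmin (z1, x1)
                  = [x1 - xmin] ++ (if ((z1, x1 + 1) : Int × Int) ∈ K then [] else [x1 + 1 - xmin]) from by
                simp [contribC, hpred1]]
            simp
        _ = foldg 0 ((wall.map (keyf j k)).flatMap (contribC K xmin)) :=
            foldg_perm (List.Perm.flatMap hpermK (fun a _ => List.Perm.refl _)) 0
        _ = foldg 0 ((wall.map (keyf j k)).flatMap (contribC (wall.map (keyf j k)) xmin)) := by
            have hfun : ∀ q, contribC K xmin q = contribC (wall.map (keyf j k)) xmin q :=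
              contrib_congr K (wall.map (keyf j k)) xmin (fun x => hpermK.mem_iff)
            rw [funext hfun]
  · -- duplicate (k, j) pair: both sides return 1
    rw [alt_of_none wall j k (seen_none j k wall PySem.Dict.empty (by simp) (by simpa using hnd))]
    have hndK : ¬ (srt.map (keyf j k)).Nodup := fun hc => hnd (hpermK.nodup_iff.mp hc)
    have hadj : adjDup (srt.map (keyf j k)) := adjDup_of_pairwise_not_nodup _ hpwle hndK
    cases hsl : srt with
    | nil => rw [hsl] at hadj; exact absurd hadj (by simp [adjDup])
    | cons w rest =>
      rw [hsl] at hadj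
      simp only [pvLoopA]
      set wk := PySem.List.pyGetD w k 0 with hwk
      set wj := PySem.List.pyGetD w j 0 with hwj
      rw [if_pos (by simp : some wk ≠ (none : Option Int))]
      cases rest with
      | nil => exact absurd hadj (by simp [adjDup])
      | cons w2 r =>
        have hnext : keyf j k w = keyf j k w2 ∨ adjDup ((w2 :: r).map (keyf j k)) := by
          simpa [adjDup] using hadj
        have harg : adjDup ((w2 :: r).map (keyf j k)) ∨
            (∃ u T', w2 :: r = u :: T' ∧ keyf j k u = (wk, (wj + 1) - 1)) := by
          rcases hnext with h | h
          · right
            refine ⟨w2, r, rfl, ?_⟩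
            rw [← h]
            show ((wk, wj) : Int × Int) = (wk, wj + 1 - 1)
            congr 1
            ring
          · left; exact h
        by_cases hg : g2 (g2 0 0) (wj - xmin) = 1
        · rw [if_pos hg]
        · rw [if_neg hg]
          exact loop_dup xmin j k (w2 :: r) wk (g2 (g2 0 0) (wj - xmin)) 1 (wj + 1) harg

-- ===== VERDICT (by name: the statement is the Claim_ definition above) =====
theorem scan_wall_spec : Claim_equal_scan_wall := by
  intro wall j k _ _
  unfold Spec_scan_wall
  exact scan_equiv wall j k
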